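-- pv_equiv track=rewrite | github.com/classskipper351/zb_ringmo | dp_schedule.py | is_valid_state
-- ===== SOURCE A (Python) =====
-- from collections import defaultdict, deque
--
-- def is_valid_state(sequences, nmb, nstages, ignore_w=False):
--     """验证当前序列是否合法"""
--     if len(sequences) != nstages:
--         return False
--     for seq in sequences:
--         try:
--             # 根据 ignore_w 设置最大序列长度
--             max_len = nmb * (2 if ignore_w else 3)
--             assert len(seq) <= max_len
--             # 检查操作类型
--             valid_ops = ['f', 'b'] if ignore_w else ['f', 'b', 'w']
--             for op in seq:
--                 assert op in valid_ops, "包含非法操作"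
--             # 检查 F 和 B 的计数
--             for op in ['f', 'b']:
--                 assert seq.count(op) <= nmb
--             # 如果不忽略 W，检查 W 的计数
--             if not ignore_w:
--                 assert seq.count('w') <= nmb
--             # 检查 F -> B -> W 依赖
--             F_stack = deque()
--             B_stack = deque()
--             for op in seq:
--                 if op == 'f':
--                     F_stack.append(op)
--                 elif op == 'b':
--                     assert F_stack, "B 操作前必须有 F"
--                     B_stack.append(op)
--                     F_stack.pop()
--                 elif op == 'w' and not ignore_w:
--                     assert B_stack, "W 操作前必须有 B"
--                     B_stack.pop()
--         except AssertionError: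
--             return False
--     for stage in range(nstages - 1):
--         prev_seq = sequences[stage]
--         succ_seq = sequences[stage + 1]
--         try:
--             assert prev_seq.count('f') >= succ_seq.count('f')
--             assert prev_seq.count('b') <= succ_seq.count('b')
--         except AssertionError:
--             return False
--     return True
-- ===== SOURCE B (Python) =====
-- def is_valid_state(sequences, nmb, nstages, ignore_w=False):
--     """验证当前序列是否合法"""
--     if len(sequences) != nstages:
--         return False
--     valid_ops = ('f', 'b') if ignore_w else ('f', 'b', 'w')
--     for seq in sequences:
--         if any(op not in valid_ops for op in seq):
--             return False
--         if seq.count('f') > nmb or seq.count('b') > nmb \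
--                 or (not ignore_w and seq.count('w') > nmb):
--             return False
--         # declarative dependency check (no stacks, no running state): every 'b'
--         # needs an unmatched 'f' strictly before it, every 'w' an unmatched 'b'
--         # -- stated as a count condition on the prefix in front of each position
--         for i, op in enumerate(seq):
--             pre = seq[:i]
--             if op == 'b' and not pre.count('b') < pre.count('f'):
--                 return False
--             if op == 'w' and not ignore_w and not pre.count('w') < pre.count('b'):
--                 return False
--     return all(prev.count('f') >= succ.count('f') and prev.count('b') <= succ.count('b')
--                for prev, succ in zip(sequences, sequences[1:]))
-- ===== Notes on version B (the rewrite author's own statement) =====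
-- stated objective: alternative
-- what changed: Replaces A's stateful two-deque F/B stack simulation (plus a separate length-cap assert, which becomes redundant and disappears) by a stateless declarative characterisation: for each position, the prefix before it must contain strictly more unmatched 'f' (resp. 'b') counted by slicing, and the stage comparison runs over zip(sequences, sequences[1:]) instead of an index range.
import Mathlib
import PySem

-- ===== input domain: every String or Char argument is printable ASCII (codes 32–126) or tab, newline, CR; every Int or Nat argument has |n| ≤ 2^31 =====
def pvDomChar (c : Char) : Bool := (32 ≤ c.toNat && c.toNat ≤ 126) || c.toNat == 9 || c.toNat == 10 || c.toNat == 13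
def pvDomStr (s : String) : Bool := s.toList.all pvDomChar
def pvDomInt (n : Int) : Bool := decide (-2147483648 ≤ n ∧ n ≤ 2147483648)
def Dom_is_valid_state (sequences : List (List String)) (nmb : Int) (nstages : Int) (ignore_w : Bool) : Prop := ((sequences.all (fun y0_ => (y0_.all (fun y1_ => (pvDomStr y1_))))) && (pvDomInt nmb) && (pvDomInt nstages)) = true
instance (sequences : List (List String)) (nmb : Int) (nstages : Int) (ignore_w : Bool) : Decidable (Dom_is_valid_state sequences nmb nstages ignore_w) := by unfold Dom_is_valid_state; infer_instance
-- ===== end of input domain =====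

-- B replaces A's stateful two-deque stack simulation (and its redundant length-cap
-- assert) by a stateless declarative prefix-count condition checked at each position,
-- and compares adjacent stages via zip (objective: alternative decomposition).

-- ===== PORT A =====
-- A's F/B deque pass: append = push right, pop = pop right (dropLast)
def pvDepA (seq : List String) (ignore_w : Bool) (F_stack B_stack : List String) : Bool :=
  match seq with
  | [] => true
  | op :: rest =>
    if op == "f" then pvDepA rest ignore_w (F_stack ++ ["f"]) B_stack
    else if op == "b" then
      if F_stack.isEmpty then false
      else pvDepA rest ignore_w F_stack.dropLast (B_stack ++ ["b"])
    else if op == "w" && !ignore_w then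
      if B_stack.isEmpty then false
      else pvDepA rest ignore_w F_stack B_stack.dropLast
    else pvDepA rest ignore_w F_stack B_stack

-- the try/except body for one seq: each assert is a conjunct, in A's order
def pvSeqOkA (seq : List String) (nmb : Int) (ignore_w : Bool) : Bool :=
  let max_len : Int := nmb * (if ignore_w then 2 else 3)
  let valid_ops : List String := if ignore_w then ["f", "b"] else ["f", "b", "w"]
  decide ((seq.length : Int) ≤ max_len) &&
  seq.all (fun op => valid_ops.contains op) &&
  (["f", "b"].all (fun op => decide ((PySem.List.count seq op : Int) ≤ nmb))) &&
  (ignore_w || decide ((PySem.List.count seq "w" : Int) ≤ nmb)) &&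
  pvDepA seq ignore_w [] []

def is_valid_state (sequences : List (List String)) (nmb : Int) (nstages : Int) (ignore_w : Bool) : Bool :=
  if (sequences.length : Int) ≠ nstages then false
  else if !(sequences.all (fun seq => pvSeqOkA seq nmb ignore_w)) then false
  else
    (PySem.List.pyRange 0 (nstages - 1) 1).all (fun stage =>
      let prev_seq := PySem.List.pyGetD sequences stage []
      let succ_seq := PySem.List.pyGetD sequences (stage + 1) []
      decide ((PySem.List.count prev_seq "f" : Int) ≥ (PySem.List.count succ_seq "f" : Int)) &&
      decide ((PySem.List.count prev_seq "b" : Int) ≤ (PySem.List.count succ_seq "b" : Int)))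

-- ===== PORT B =====
-- Source B's inner loop: for i, op in enumerate(seq), pre = seq[:i], two prefix-count checks
def pvDepB (seq : List String) (iw : Bool) : Bool :=
  (PySem.List.enumerate seq 0).all fun p =>
    let pre := PySem.List.slice seq none (some p.1)
    (if p.2 == "b" then decide ((PySem.List.count pre "b" : Int) < (PySem.List.count pre "f" : Int)) else true) &&
    (if p.2 == "w" && !iw then decide ((PySem.List.count pre "w" : Int) < (PySem.List.count pre "b" : Int)) else true)

-- Source B's per-seq body: op membership, the three count caps, then the declarative check
def pvSeqOkB (seq : List String) (nmb : Int) (iw : Bool) : Bool :=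
  let valid_ops : List String := if iw then ["f", "b"] else ["f", "b", "w"]
  seq.all (fun op => valid_ops.contains op) &&
  !(decide ((PySem.List.count seq "f" : Int) > nmb) || decide ((PySem.List.count seq "b" : Int) > nmb) ||
    (!iw && decide ((PySem.List.count seq "w" : Int) > nmb))) &&
  pvDepB seq iw

def is_valid_state_alt (sequences : List (List String)) (nmb : Int) (nstages : Int) (ignore_w : Bool) : Bool :=
  if (sequences.length : Int) ≠ nstages then false
  else if !(sequences.all fun seq => pvSeqOkB seq nmb ignore_w) then false
  else
    (sequences.zip sequences.tail).all fun p =>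
      decide ((PySem.List.count p.1 "f" : Int) ≥ (PySem.List.count p.2 "f" : Int)) &&
      decide ((PySem.List.count p.1 "b" : Int) ≤ (PySem.List.count p.2 "b" : Int))

-- ===== PRECONDITION & SPEC =====
def Spec_is_valid_state (sequences : List (List String)) (nmb : Int) (nstages : Int) (ignore_w : Bool) (out : Bool) : Prop := out = is_valid_state_alt sequences nmb nstages ignore_w
instance (sequences : List (List String)) (nmb : Int) (nstages : Int) (ignore_w : Bool) (out : Bool) : Decidable (Spec_is_valid_state sequences nmb nstages ignore_w out) := by unfold Spec_is_valid_state; infer_instance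

-- ===== CLAIM (what is proved, stated in full; the proofs are below) =====
def Claim_equal_is_valid_state : Prop := ∀ (sequences : List (List String)) (nmb : Int) (nstages : Int) (ignore_w : Bool), Dom_is_valid_state sequences nmb nstages ignore_w → Spec_is_valid_state sequences nmb nstages ignore_w (is_valid_state sequences nmb nstages ignore_w)

-- ===== LEMMAS AND PROOFS =====

-- proof-only abstraction of the dependency condition: open-f / open-b balances
def pvDepRec (seq : List String) (iw : Bool) (fo bo : Int) : Bool :=
  match seq with
  | [] => true
  | op :: rest =>
    if op == "f" then pvDepRec rest iw (fo + 1) bo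
    else if op == "b" then decide (0 < fo) && pvDepRec rest iw (fo - 1) (bo + 1)
    else if op == "w" && !iw then decide (0 < bo) && pvDepRec rest iw fo (bo - 1)
    else pvDepRec rest iw fo bo

-- the quantified (prefix-count) form of the same condition, with offsets
def pvDepQ (seq : List String) (iw : Bool) (fo bo : Int) : Bool :=
  (List.range seq.length).all fun k =>
    let pre := seq.take k
    (if seq.getD k "" == "b" then decide ((PySem.List.count pre "b" : Int) < (PySem.List.count pre "f" : Int) + fo) else true) &&
    (if seq.getD k "" == "w" && !iw then decide ((PySem.List.count pre "w" : Int) < (PySem.List.count pre "b" : Int) + bo) else true)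

lemma pvAllCongr {α : Type} {l : List α} {p q : α → Bool}
    (h : ∀ x ∈ l, p x = q x) : l.all p = l.all q := by
  induction l with
  | nil => rfl
  | cons x xs ih =>
    simp only [List.all_cons, h x (List.mem_cons_self), ih (fun y hy => h y (List.mem_cons_of_mem x hy))]

lemma pvDepA_eq_rec (seq : List String) (iw : Bool) :
    ∀ (F B : List String), pvDepA seq iw F B = pvDepRec seq iw (F.length : Int) (B.length : Int) := by
  induction seq with
  | nil => intro F B; rfl
  | cons op rest ih =>
    intro F B
    rw [pvDepA, pvDepRec]
    by_cases hf : op = "f"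
    · subst hf
      simp only [beq_self_eq_true, if_true]
      rw [ih (F ++ ["f"]) B]
      congr 1
      simp
    · by_cases hb : op = "b"
      · subst hb
        simp only [show (("b":String) == "f") = false by decide, beq_self_eq_true,
          Bool.false_eq_true, if_false, if_true]
        match F with
        | [] => simp [List.isEmpty_nil]
        | x :: F' =>
          simp only [List.isEmpty_cons, Bool.false_eq_true, if_false]
          rw [ih (x :: F').dropLast (B ++ ["b"])]
          have h1 : (((x :: F').dropLast).length : Int) = ((x :: F').length : Int) - 1 := by
            rw [List.length_dropLast]; simp only [List.length_cons]; push_cast; omega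
          have h2 : ((B ++ ["b"]).length : Int) = (B.length : Int) + 1 := by
            simp
          rw [h1, h2]
          have hpos : decide ((0:Int) < ((x :: F').length : Int)) = true := by
            simp only [List.length_cons, decide_eq_true_eq]; push_cast; omega
          rw [hpos, Bool.true_and]
      · by_cases hw : op = "w"
        · subst hw
          simp only [show (("w":String) == "f") = false by decide,
            show (("w":String) == "b") = false by decide, beq_self_eq_true,
            Bool.false_eq_true, if_false, Bool.true_and]
          cases iw with
          | true => simp only [Bool.not_true, Bool.and_false, Bool.false_eq_true, if_false]; exact ih F B
          | false =>
            simp only [Bool.not_false, Bool.and_true, if_true]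
            match B with
            | [] => simp [List.isEmpty_nil]
            | y :: B' =>
              simp only [List.isEmpty_cons, Bool.false_eq_true, if_false]
              rw [ih F (y :: B').dropLast]
              have h1 : (((y :: B').dropLast).length : Int) = ((y :: B').length : Int) - 1 := by
                rw [List.length_dropLast]; simp only [List.length_cons]; push_cast; omega
              rw [h1]
              have hpos : decide ((0:Int) < ((y :: B').length : Int)) = true := by
                simp only [List.length_cons, decide_eq_true_eq]; push_cast; omega
              rw [hpos, Bool.true_and]
        · simp only [show (op == "f") = false by simpa using hf,
            show (op == "b") = false by simpa using hb,
            show (op == "w") = false by simpa using hw,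
            Bool.false_eq_true, if_false, Bool.false_and]
          exact ih F B

lemma pvDepQ_iw_bo (seq : List String) (fo bo bo' : Int) :
    pvDepQ seq true fo bo = pvDepQ seq true fo bo' := by
  unfold pvDepQ
  apply pvAllCongr
  intro k _
  simp

lemma pvDepRec_eq_Q (seq : List String) (iw : Bool) :
    ∀ (fo bo : Int), pvDepRec seq iw fo bo = pvDepQ seq iw fo bo := by
  induction seq with
  | nil => intro fo bo; rfl
  | cons op rest ih =>
    intro fo bo
    rw [pvDepRec, pvDepQ]
    simp only [List.length_cons, List.range_succ_eq_map, List.all_cons, List.all_map]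
    have hshift : ∀ (fo' bo' : Int),
        fo' = fo + (PySem.List.count [op] "f" : Int) - (PySem.List.count [op] "b" : Int) →
        bo' = bo + (PySem.List.count [op] "b" : Int) - (PySem.List.count [op] "w" : Int) →
        (List.range rest.length).all ((fun k =>
          let pre := (op :: rest).take k
          (if (op :: rest).getD k "" == "b" then decide ((PySem.List.count pre "b" : Int) < (PySem.List.count pre "f" : Int) + fo) else true) &&
          (if (op :: rest).getD k "" == "w" && !iw then decide ((PySem.List.count pre "w" : Int) < (PySem.List.count pre "b" : Int) + bo) else true)) ∘ Nat.succ)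
        = pvDepQ rest iw fo' bo' := by
      intro fo' bo' hfo hbo
      rw [pvDepQ]
      apply pvAllCongr
      intro k _
      simp only [Function.comp_def, Nat.succ_eq_add_one, List.take_succ_cons, List.getD_cons_succ]
      have hc : ∀ x, (PySem.List.count (op :: rest.take k) x : Int)
          = (PySem.List.count (rest.take k) x : Int) + (PySem.List.count [op] x : Int) := by
        intro x
        simp only [PySem.List.count_eq, List.count_cons, List.count_singleton, List.count_nil]
        split_ifs <;> push_cast <;> omega
      simp only [hc]
      congr 1
      · by_cases h : (rest.getD k "" == "b") = true <;> simp only [h, if_true, Bool.false_eq_true, if_false]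
        rw [Bool.eq_iff_iff]
        simp only [decide_eq_true_eq]
        subst hfo
        constructor <;> intro <;> omega
      · by_cases h : (rest.getD k "" == "w" && !iw) = true <;> simp only [h, if_true, Bool.false_eq_true, if_false]
        rw [Bool.eq_iff_iff]
        simp only [decide_eq_true_eq]
        subst hfo hbo
        constructor <;> intro <;> omega
    have hhead :
        (let pre := (op :: rest).take 0
         (if (op :: rest).getD 0 "" == "b" then decide ((PySem.List.count pre "b" : Int) < (PySem.List.count pre "f" : Int) + fo) else true) &&
         (if (op :: rest).getD 0 "" == "w" && !iw then decide ((PySem.List.count pre "w" : Int) < (PySem.List.count pre "b" : Int) + bo) else true))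
        = ((if op == "b" then decide ((0:Int) < fo) else true) &&
           (if op == "w" && !iw then decide ((0:Int) < bo) else true)) := by
      simp [PySem.List.count]
    rw [hhead]
    by_cases hf : op = "f"
    · subst hf
      rw [hshift (fo + 1) bo (by simp [PySem.List.count_eq]; try omega) (by simp [PySem.List.count_eq]; try omega)]
      rw [ih (fo + 1) bo]
      simp [show (("f":String) == "b") = false by decide, show (("f":String) == "w") = false by decide]
    · by_cases hb : op = "b"
      · subst hb
        rw [hshift (fo - 1) (bo + 1) (by simp [PySem.List.count_eq]; try omega) (by simp [PySem.List.count_eq]; try omega)]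
        rw [ih (fo - 1) (bo + 1)]
        simp [show (("b":String) == "f") = false by decide, show (("b":String) == "w") = false by decide]
      · by_cases hw : op = "w"
        · subst hw
          cases iw with
          | true =>
            rw [hshift fo (bo - 1) (by simp [PySem.List.count_eq]; try omega) (by simp [PySem.List.count_eq]; try omega)]
            rw [ih fo bo, pvDepQ_iw_bo rest fo bo (bo - 1)]
            simp
          | false =>
            rw [hshift fo (bo - 1) (by simp [PySem.List.count_eq]; try omega) (by simp [PySem.List.count_eq]; try omega)]
            rw [ih fo (bo - 1)]
            simp [show (("w":String) == "f") = false by decide, show (("w":String) == "b") = false by decide]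
        · have c1 : (op == "f") = false := by simpa using hf
          have c2 : (op == "b") = false := by simpa using hb
          have c3 : (op == "w") = false := by simpa using hw
          rw [hshift fo bo
            (by simp [PySem.List.count_eq, List.count_singleton, c1, c2]; try omega)
            (by simp [PySem.List.count_eq, List.count_singleton, c2, c3]; try omega)]
          rw [ih fo bo]
          simp [c1, c2, c3]

lemma pvDepB_eq_Q (seq : List String) (iw : Bool) :
    pvDepB seq iw = pvDepQ seq iw 0 0 := by
  rw [pvDepB, pvDepQ]
  rw [PySem.List.enumerate_eq_map_pyRange seq ""]
  rw [PySem.List.pyRange_one]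
  rw [show ((PySem.List.len seq) - 0).toNat = seq.length by simp [PySem.List.len]]
  simp only [List.all_map]
  refine pvAllCongr fun k hk => ?_
  rw [List.mem_range] at hk
  simp only [Function.comp_def, zero_add]
  rw [PySem.List.slice_to_natCast, PySem.List.pyGetD_natCast]
  simp only [add_zero]

-- with all ops valid, the length is the sum of the three counts (A's length cap is implied)
lemma pvLen_eq (seq : List String) (iw : Bool)
    (h : seq.all (fun op => (if iw then ["f", "b"] else ["f", "b", "w"]).contains op) = true) :
    seq.length = PySem.List.count seq "f" + PySem.List.count seq "b" + PySem.List.count seq "w" := by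
  induction seq with
  | nil => simp [PySem.List.count]
  | cons op rest ih =>
    simp only [List.all_cons, Bool.and_eq_true] at h
    obtain ⟨h1, h2⟩ := h
    have hmem : op = "f" ∨ op = "b" ∨ op = "w" := by
      cases iw <;> simp_all <;> tauto
    have ih' := ih (by simpa using h2)
    simp only [List.length_cons, PySem.List.count_eq, List.count_cons] at *
    rcases hmem with h' | h' | h' <;> subst h' <;> simp <;> omega

lemma pvSeqOk_eq (seq : List String) (nmb : Int) (iw : Bool) :
    pvSeqOkA seq nmb iw = pvSeqOkB seq nmb iw := by
  have hdep : pvDepA seq iw [] [] = pvDepB seq iw := by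
    rw [pvDepA_eq_rec seq iw [] [], pvDepB_eq_Q]
    simpa using pvDepRec_eq_Q seq iw 0 0
  cases iw with
  | false =>
    unfold pvSeqOkA pvSeqOkB
    by_cases hall : seq.all (fun op => (["f", "b", "w"] : List String).contains op) = true
    · have hlen := pvLen_eq seq false (by simpa using hall)
      simp only [PySem.List.count_eq] at hlen
      by_cases hdp : pvDepB seq false = true
      · rw [Bool.eq_iff_iff]
        simp only [Bool.false_eq_true, if_false, hdep, hdp, hall, Bool.true_and, Bool.and_true,
          Bool.not_false, Bool.and_eq_true, Bool.or_eq_true, Bool.not_eq_true',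
          Bool.or_eq_false_iff, Bool.and_eq_false_iff, decide_eq_true_eq,
          decide_eq_false_iff_not, List.all_cons, List.all_nil, and_true, true_and, not_lt,
          false_or, or_false, Bool.false_or, Bool.or_false,
          PySem.List.count_eq]
        omega
      · have hdf : pvDepB seq false = false := by
          revert hdp; cases pvDepB seq false <;> simp
        simp only [hdep, hdf, Bool.and_false]
    · have hf : seq.all (fun op => (["f", "b", "w"] : List String).contains op) = false := by
        revert hall; cases seq.all (fun op => (["f", "b", "w"] : List String).contains op) <;> simp
      simp only [Bool.false_eq_true, if_false, hf, Bool.and_false, Bool.false_and]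
  | true =>
    unfold pvSeqOkA pvSeqOkB
    by_cases hall : seq.all (fun op => (["f", "b"] : List String).contains op) = true
    · have hlen := pvLen_eq seq true (by simpa using hall)
      simp only [PySem.List.count_eq] at hlen
      have hw0 : List.count "w" seq = 0 := by
        rw [List.count_eq_zero]
        intro hmem
        have := List.all_eq_true.mp hall _ hmem
        simp at this
      by_cases hdp : pvDepB seq true = true
      · rw [Bool.eq_iff_iff]
        simp only [if_true, hdep, hdp, hall, Bool.true_and, Bool.and_true, Bool.not_true,
          Bool.false_and, Bool.or_false, Bool.true_or, Bool.and_eq_true, Bool.or_eq_true,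
          Bool.not_eq_true', Bool.or_eq_false_iff, Bool.and_eq_false_iff, decide_eq_true_eq,
          decide_eq_false_iff_not, List.all_cons, List.all_nil, and_true, true_and, not_lt,
          true_or, or_true, Bool.true_or, Bool.or_true,
          PySem.List.count_eq, hw0]
        omega
      · have hdf : pvDepB seq true = false := by
          revert hdp; cases pvDepB seq true <;> simp
        simp only [hdep, hdf, Bool.and_false]
    · have hf : seq.all (fun op => (["f", "b"] : List String).contains op) = false := by
        revert hall; cases seq.all (fun op => (["f", "b"] : List String).contains op) <;> simp
      simp only [if_true, hf, Bool.and_false, Bool.false_and]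

lemma pvRangeAdjNat {α : Type} (P : α → α → Bool) (d : α) :
    ∀ (l : List α),
    (List.range (l.length - 1)).all (fun k => P (l.getD k d) (l.getD (k + 1) d))
    = (l.zip l.tail).all (fun p => P p.1 p.2)
  | [] => by simp
  | [x] => by simp
  | x :: y :: rest => by
    have ih := pvRangeAdjNat P d (y :: rest)
    simp only [List.length_cons, Nat.add_sub_cancel] at ih ⊢
    rw [List.range_succ_eq_map]
    simp only [List.all_cons, List.all_map, List.tail_cons, List.zip_cons_cons,
      Function.comp_def, Nat.succ_eq_add_one, List.getD_cons_zero, List.getD_cons_succ]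
    simp only [List.tail_cons, List.getD_cons_succ] at ih
    rw [← ih]

lemma pvRangeAdj {α : Type} (l : List α) (d : α) (P : α → α → Bool) :
    (PySem.List.pyRange 0 ((l.length : Int) - 1) 1).all
      (fun i => P (PySem.List.pyGetD l i d) (PySem.List.pyGetD l (i + 1) d))
    = (l.zip l.tail).all (fun p => P p.1 p.2) := by
  rw [← pvRangeAdjNat P d l]
  rw [PySem.List.pyRange_one]
  rw [List.all_map]
  have hlen : ((l.length : Int) - 1 - 0).toNat = l.length - 1 := by omega
  rw [hlen]
  congr 1
  funext k
  have h1 : PySem.List.pyGetD l ((0 : Int) + (k : Int)) d = l.getD k d := by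
    rw [zero_add, PySem.List.pyGetD_natCast]
  have h2 : PySem.List.pyGetD l ((0 : Int) + (k : Int) + 1) d = l.getD (k + 1) d := by
    rw [zero_add, show ((k : Int) + 1) = ((k + 1 : Nat) : Int) by push_cast; ring,
      PySem.List.pyGetD_natCast]
  simp only [Function.comp_def]
  rw [h1, h2]

-- ===== VERDICT (by name: the statement is the Claim_ definition above) =====
theorem is_valid_state_spec : Claim_equal_is_valid_state := by
  intro sequences nmb nstages ignore_w _hdom
  unfold Spec_is_valid_state is_valid_state is_valid_state_alt
  by_cases hg : (sequences.length : Int) ≠ nstages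
  · rw [if_pos hg, if_pos hg]
  · rw [if_neg hg, if_neg hg]
    have hok : (sequences.all fun seq => pvSeqOkA seq nmb ignore_w)
        = (sequences.all fun seq => pvSeqOkB seq nmb ignore_w) := by
      exact pvAllCongr (fun s _ => pvSeqOk_eq s nmb ignore_w)
    rw [hok]
    by_cases hall : (sequences.all fun seq => pvSeqOkB seq nmb ignore_w) = true
    · simp only [hall, Bool.not_true, Bool.false_eq_true, if_false]
      rw [not_not] at hg
      rw [← hg]
      rw [pvRangeAdj sequences [] (fun p q =>
        decide ((PySem.List.count p "f" : Int) ≥ (PySem.List.count q "f" : Int)) &&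
        decide ((PySem.List.count p "b" : Int) ≤ (PySem.List.count q "b" : Int)))]
    · simp only [Bool.not_eq_true] at hall
      simp [hall]
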